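-- pv_equiv track=rewrite | github.com/Mookimooki/algorithm | greedy/1.py | solution
-- ===== SOURCE A (Python) =====
-- def solution(n, lost, reserve):
--     babo = set(lost) & set(reserve)
--     reserve = list(set(reserve) - babo)
--     lost = sorted(list(set(lost) - babo))
--
--     for x in lost:
--         for y in [x-1, x+1]:
--             if y in reserve:
--                 reserve.remove(y)
--                 n += 1
--                 break
--
--     return n - len(lost)
-- ===== SOURCE B (Python) =====
-- def solution(n, lost, reserve):
--     L = sorted(set(lost) - set(reserve))
--     R = sorted(set(reserve) - set(lost))
--     i = j = matched = 0
--     while i < len(L) and j < len(R):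
--         if R[j] < L[i] - 1:
--             j += 1
--         elif R[j] > L[i] + 1:
--             i += 1
--         else:
--             matched += 1
--             i += 1
--             j += 1
--     return n - len(L) + matched
-- ===== Notes on version B (the rewrite author's own statement) =====
-- stated objective: faster
-- what changed: A removes matched suits from a plain list inside a loop over the sorted lost set (list membership + list.remove give quadratic work); B sorts both deduped sets once and counts matches with a single two-pointer merge sweep.
import Mathlib
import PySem

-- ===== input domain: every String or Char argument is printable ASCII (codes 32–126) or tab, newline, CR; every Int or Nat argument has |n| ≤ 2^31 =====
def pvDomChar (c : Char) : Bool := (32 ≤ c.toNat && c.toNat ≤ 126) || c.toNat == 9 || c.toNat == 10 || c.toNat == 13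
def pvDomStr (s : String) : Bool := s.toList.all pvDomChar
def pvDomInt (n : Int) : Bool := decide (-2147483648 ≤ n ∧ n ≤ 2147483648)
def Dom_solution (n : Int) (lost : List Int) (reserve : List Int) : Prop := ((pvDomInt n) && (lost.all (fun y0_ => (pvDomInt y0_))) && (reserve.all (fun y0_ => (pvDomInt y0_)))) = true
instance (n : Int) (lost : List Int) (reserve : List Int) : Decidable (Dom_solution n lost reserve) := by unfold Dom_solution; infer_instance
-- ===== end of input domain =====

-- B replaces A's quadratic loop (list membership + remove inside a loop over lost) by a
-- sort-both-then-two-pointer merge counting matches; same return value, different algorithm.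

-- ===== PORT A =====
def solution (n : Int) (lost : List Int) (reserve : List Int) : Int :=
  let babo := PySem.Set.inter (PySem.Set.ofList lost) (PySem.Set.ofList reserve)
  let reserve1 := PySem.Set.diff (PySem.Set.ofList reserve) babo
  let lost1 := PySem.List.sorted (PySem.Set.diff (PySem.Set.ofList lost) babo) (fun x => x)
  let st := lost1.foldl (fun (st : List Int × Int) x =>
    -- 'for y in [x-1, x+1]: if y in reserve: reserve.remove(y); n += 1; break', the
    -- two-element loop with break unrolled
    if st.1.contains (x - 1) then ((PySem.List.remove? st.1 (x - 1)).getD st.1, st.2 + 1)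
    else if st.1.contains (x + 1) then ((PySem.List.remove? st.1 (x + 1)).getD st.1, st.2 + 1)
    else st) (reserve1, n)
  st.2 - lost1.length

-- ===== PORT B =====
-- B's while-loop over indices i, j, ported as recursion on the two list suffixes
def tpMatch : List Int → List Int → Int
  | [], _ => 0
  | _ :: _, [] => 0
  | x :: L, y :: R =>
      if y < x - 1 then tpMatch (x :: L) R
      else if y > x + 1 then tpMatch L (y :: R)
      else 1 + tpMatch L R
termination_by L R => L.length + R.length

def solution_alt (n : Int) (lost : List Int) (reserve : List Int) : Int :=
  let L := PySem.List.sorted (PySem.Set.diff (PySem.Set.ofList lost) (PySem.Set.ofList reserve)) (fun x => x)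
  let R := PySem.List.sorted (PySem.Set.diff (PySem.Set.ofList reserve) (PySem.Set.ofList lost)) (fun x => x)
  n - L.length + tpMatch L R

-- ===== PRECONDITION & SPEC =====
def Spec_solution (n : Int) (lost : List Int) (reserve : List Int) (out : Int) : Prop := out = solution_alt n lost reserve
instance (n : Int) (lost : List Int) (reserve : List Int) (out : Int) : Decidable (Spec_solution n lost reserve out) := by unfold Spec_solution; infer_instance

-- ===== CLAIM (what is proved, stated in full; the proofs are below) =====
def Claim_equal_solution : Prop := ∀ (n : Int) (lost : List Int) (reserve : List Int), Dom_solution n lost reserve → Spec_solution n lost reserve (solution n lost reserve)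

-- ===== LEMMAS AND PROOFS =====

-- A's loop, abstracted: number of matches the greedy loop makes (reserve kept as an unordered list)
def matchedA : List Int → List Int → Int
  | [], _ => 0
  | x :: L, R =>
      if (x - 1) ∈ R then 1 + matchedA L (R.erase (x - 1))
      else if (x + 1) ∈ R then 1 + matchedA L (R.erase (x + 1))
      else matchedA L R

theorem foldl_eq_matchedA (L : List Int) (R : List Int) (n : Int) :
    (L.foldl (fun (st : List Int × Int) x =>
      if st.1.contains (x - 1) then ((PySem.List.remove? st.1 (x - 1)).getD st.1, st.2 + 1)
      else if st.1.contains (x + 1) then ((PySem.List.remove? st.1 (x + 1)).getD st.1, st.2 + 1)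
      else st) (R, n)).2 = n + matchedA L R := by
  induction L generalizing R n with
  | nil => simp [matchedA]
  | cons x L ih =>
    rw [List.foldl_cons]
    by_cases h1 : (x - 1) ∈ R
    · have hstep : (if (R, n).1.contains (x - 1) then ((PySem.List.remove? (R, n).1 (x - 1)).getD (R, n).1, (R, n).2 + 1)
          else if (R, n).1.contains (x + 1) then ((PySem.List.remove? (R, n).1 (x + 1)).getD (R, n).1, (R, n).2 + 1)
          else (R, n)) = (R.erase (x - 1), n + 1) := by
        simp only [List.contains_iff_mem, h1, if_pos,
          PySem.List.remove?_eq_some_erase R _ h1, Option.getD_some]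
      rw [hstep, ih]
      simp only [matchedA, h1, if_pos]
      ring
    · by_cases h2 : (x + 1) ∈ R
      · have hstep : (if (R, n).1.contains (x - 1) then ((PySem.List.remove? (R, n).1 (x - 1)).getD (R, n).1, (R, n).2 + 1)
            else if (R, n).1.contains (x + 1) then ((PySem.List.remove? (R, n).1 (x + 1)).getD (R, n).1, (R, n).2 + 1)
            else (R, n)) = (R.erase (x + 1), n + 1) := by
          simp only [List.contains_iff_mem, h1, h2, if_false, if_pos,
            PySem.List.remove?_eq_some_erase R _ h2, Option.getD_some]
        rw [hstep, ih]
        simp only [matchedA, h1, h2, if_pos, if_neg, not_false_iff]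
        ring
      · have hstep : (if (R, n).1.contains (x - 1) then ((PySem.List.remove? (R, n).1 (x - 1)).getD (R, n).1, (R, n).2 + 1)
            else if (R, n).1.contains (x + 1) then ((PySem.List.remove? (R, n).1 (x + 1)).getD (R, n).1, (R, n).2 + 1)
            else (R, n)) = (R, n) := by
          simp only [List.contains_iff_mem, h1, h2, if_false]
        rw [hstep, ih]
        simp only [matchedA, h1, h2, if_neg, not_false_iff]

theorem matchedA_nil_right (L : List Int) : matchedA L [] = 0 := by
  induction L with
  | nil => rfl
  | cons x L ih => simp [matchedA, ih]

theorem matchedA_perm (L : List Int) : ∀ R R' : List Int, R.Perm R' →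
    matchedA L R = matchedA L R' := by
  induction L with
  | nil => intro R R' _; rfl
  | cons x L ih =>
    intro R R' h
    simp only [matchedA, h.mem_iff]
    by_cases h1 : (x - 1) ∈ R'
    · simp only [h1, if_pos, ih _ _ (h.erase (x - 1))]
    · by_cases h2 : (x + 1) ∈ R'
      · simp only [h1, h2, if_pos, if_neg, not_false_iff, ih _ _ (h.erase (x + 1))]
      · simp only [h1, h2, if_neg, not_false_iff, ih _ _ h]

theorem matchedA_skip (y : Int) (L R : List Int) (hy : ∀ z ∈ L, y + 1 < z) :
    matchedA L (y :: R) = matchedA L R := by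
  induction L generalizing R with
  | nil => rfl
  | cons x L ih =>
    have hx : y + 1 < x := hy x (by simp)
    have h1 : x - 1 ≠ y := by omega
    have h2 : x + 1 ≠ y := by omega
    have hm1 : (x - 1) ∈ y :: R ↔ (x - 1) ∈ R := by simp [h1]
    have hm2 : (x + 1) ∈ y :: R ↔ (x + 1) ∈ R := by simp [h2]
    have he1 : (y :: R).erase (x - 1) = y :: R.erase (x - 1) :=
      List.erase_cons_tail (by simp [Ne.symm h1])
    have he2 : (y :: R).erase (x + 1) = y :: R.erase (x + 1) :=
      List.erase_cons_tail (by simp [Ne.symm h2])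
    have hy' : ∀ z ∈ L, y + 1 < z := fun z hz => hy z (by simp [hz])
    simp only [matchedA, hm1, hm2, he1, he2]
    by_cases hb1 : (x - 1) ∈ R
    · simp [hb1, ih _ hy']
    · by_cases hb2 : (x + 1) ∈ R
      · simp [hb1, hb2, ih _ hy']
      · simp [hb1, hb2, ih _ hy']

theorem matchedA_eq_tpMatch (k : Nat) : ∀ (L R : List Int), L.length + R.length ≤ k →
    L.Pairwise (· < ·) → R.Pairwise (· < ·) → (∀ x ∈ L, x ∉ R) →
    matchedA L R = tpMatch L R := by
  induction k with
  | zero =>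
    intro L R hk _ _ _
    have : L = [] := by cases L <;> simp_all
    subst this; simp [matchedA, tpMatch]
  | succ k ih =>
    intro L R hk hL hR hd
    match L, R with
    | [], R => simp [matchedA, tpMatch]
    | x :: L, [] => rw [matchedA_nil_right]; simp [tpMatch]
    | x :: L, y :: R =>
      have hLs : L.Pairwise (· < ·) := hL.of_cons
      have hRs : R.Pairwise (· < ·) := hR.of_cons
      have hxL : ∀ z ∈ L, x < z := by
        intro z hz; exact (List.pairwise_cons.mp hL).1 z hz
      have hyR : ∀ z ∈ R, y < z := by
        intro z hz; exact (List.pairwise_cons.mp hR).1 z hz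
      have hxy : x ≠ y := by
        intro h; exact hd x (by simp) (by simp [h])
      have hds : ∀ z ∈ L, z ∉ y :: R := fun z hz => hd z (by simp [hz])
      by_cases c1 : y < x - 1
      · -- y matches nothing in x :: L: drop y on both sides
        rw [tpMatch]; simp only [c1, if_pos]
        have hall : ∀ z ∈ x :: L, y + 1 < z := by
          intro z hz
          rcases List.mem_cons.mp hz with h | h
          · omega
          · have := hxL z h; omega
        rw [matchedA_skip y (x :: L) R hall]
        exact ih (x :: L) R (by simp at hk ⊢; omega) hL hRs
          (fun z hz => fun hzr => hd z hz (by simp [hzr]))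
      · by_cases c2 : x + 1 < y
        · -- x matches nothing in y :: R
          rw [tpMatch]; simp only [c1, c2, if_pos, if_false]
          have hm1 : (x - 1) ∉ y :: R := by
            intro h
            rcases List.mem_cons.mp h with h | h
            · omega
            · have := hyR _ h; omega
          have hm2 : (x + 1) ∉ y :: R := by
            intro h
            rcases List.mem_cons.mp h with h | h
            · omega
            · have := hyR _ h; omega
          rw [matchedA]; simp only [hm1, hm2, if_neg, not_false_iff]
          exact ih L (y :: R) (by simp at hk ⊢; omega) hLs hR
            (fun z hz => hds z hz)
        · -- y ∈ {x-1, x+1}: both sides match x with y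
          rw [tpMatch, if_neg c1, if_neg c2]
          have htail : matchedA L R = tpMatch L R :=
            ih L R (by simp at hk ⊢; omega) hLs hRs
              (fun z hz hzr => hd z (by simp [hz]) (by simp [hzr]))
          rcases lt_or_ge x y with hlt | hge
          · -- y = x + 1
            have hy1 : y = x + 1 := by omega
            subst hy1
            have hm1 : (x - 1) ∉ (x + 1) :: R := by
              intro h
              rcases List.mem_cons.mp h with h | h
              · omega
              · have := hyR _ h; omega
            rw [matchedA, if_neg hm1, if_pos (List.mem_cons_self), List.erase_cons_head, htail]
          · -- y = x - 1
            have hy1 : y = x - 1 := by omega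
            subst hy1
            rw [matchedA, if_pos (List.mem_cons_self), List.erase_cons_head, htail]

-- the two diff-lists A builds equal the ones B builds (same filter over the same list)
theorem diff_inter_left (xs ys : List Int) :
    PySem.Set.diff (PySem.Set.ofList xs) (PySem.Set.inter (PySem.Set.ofList xs) (PySem.Set.ofList ys))
      = PySem.Set.diff (PySem.Set.ofList xs) (PySem.Set.ofList ys) := by
  show List.filter _ _ = List.filter _ _
  apply List.filter_congr
  intro x hx
  have : x ∈ PySem.Set.inter (PySem.Set.ofList xs) (PySem.Set.ofList ys) ↔ x ∈ PySem.Set.ofList ys := by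
    rw [PySem.Set.mem_inter]; simp [hx]
  simp only [PySem.Set.contains_eq_listContains]
  simp [this]

theorem diff_inter_right (xs ys : List Int) :
    PySem.Set.diff (PySem.Set.ofList ys) (PySem.Set.inter (PySem.Set.ofList xs) (PySem.Set.ofList ys))
      = PySem.Set.diff (PySem.Set.ofList ys) (PySem.Set.ofList xs) := by
  show List.filter _ _ = List.filter _ _
  apply List.filter_congr
  intro x hx
  have : x ∈ PySem.Set.inter (PySem.Set.ofList xs) (PySem.Set.ofList ys) ↔ x ∈ PySem.Set.ofList xs := by
    rw [PySem.Set.mem_inter]; simp [hx]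
  simp only [PySem.Set.contains_eq_listContains]
  simp [this]

theorem sorted_pairwise_lt (xs : List Int) (h : xs.Nodup) :
    (PySem.List.sorted xs (fun x => x)).Pairwise (· < ·) := by
  have hle := PySem.List.sorted_pairwise xs (fun x => x)
  have hnd : (PySem.List.sorted xs (fun x => x)).Nodup :=
    (PySem.List.sorted_perm xs (fun x => x) false).nodup_iff.mpr h
  exact (hle.and hnd).imp (fun {a b} hab => lt_of_le_of_ne hab.1 hab.2)

-- ===== VERDICT (by name: the statement is the Claim_ definition above) =====
theorem solution_spec : Claim_equal_solution := by
  intro n lost reserve _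
  show solution n lost reserve = solution_alt n lost reserve
  simp only [solution, solution_alt]
  rw [diff_inter_left, diff_inter_right]
  set Ls := PySem.Set.diff (PySem.Set.ofList lost) (PySem.Set.ofList reserve) with hLs
  set Rs := PySem.Set.diff (PySem.Set.ofList reserve) (PySem.Set.ofList lost) with hRs
  set L := PySem.List.sorted Ls (fun x => x) with hL
  set R := PySem.List.sorted Rs (fun x => x) with hR
  rw [foldl_eq_matchedA]
  have hRsnd : Rs.Nodup := PySem.Set.nodup_diff _ _ (PySem.Set.nodup_ofList reserve)
  have hLsnd : Ls.Nodup := PySem.Set.nodup_diff _ _ (PySem.Set.nodup_ofList lost)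
  have hperm : Rs.Perm R := (PySem.List.sorted_perm Rs (fun x => x) false).symm
  have hLp : L.Pairwise (· < ·) := sorted_pairwise_lt Ls hLsnd
  have hRp : R.Pairwise (· < ·) := sorted_pairwise_lt Rs hRsnd
  have hdisj : ∀ x ∈ L, x ∉ R := by
    intro x hx hxr
    rw [PySem.List.mem_sorted, hLs, PySem.Set.mem_diff] at hx
    rw [PySem.List.mem_sorted, hRs, PySem.Set.mem_diff] at hxr
    exact hx.2 hxr.1
  rw [matchedA_perm L Rs R hperm,
    matchedA_eq_tpMatch (L.length + R.length) L R le_rfl hLp hRp hdisj]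
  ring
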